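-- pv_equiv track=rewrite | github.com/itsMyrto/3914_thesis | utils.py | compute_square_root
-- ===== SOURCE A (Python) =====
-- def compute_square_root(num: int, factor_base: list[int]) -> int:
--     square_num = 1
--
--     for p in factor_base:
--         factor = p * p
--         while num % factor == 0:
--             num //= factor
--             square_num *= p
--
--     return square_num
-- ===== SOURCE B (Python) =====
-- def compute_square_root(num: int, factor_base: list[int]) -> int:
--     square_num = 1
--     for p in factor_base:
--         q = p * p
--         while num % q == 0:
--             # strip the largest q**(2**k) dividing num, found by repeated squaring
--             step, root = q, p
--             while num % (step * step) == 0: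
--                 step, root = step * step, step
--             num //= step
--             square_num *= root
--     return square_num
-- ===== Notes on version B (the rewrite author's own statement) =====
-- stated objective: alternative
-- what changed: Instead of removing one factor p² at a time, B per base element greedily strips the largest power (p²)^(2^k) still dividing num, found by repeated squaring, so each element needs O(log e) divisions (e = multiplicity) instead of e.
import Mathlib
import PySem

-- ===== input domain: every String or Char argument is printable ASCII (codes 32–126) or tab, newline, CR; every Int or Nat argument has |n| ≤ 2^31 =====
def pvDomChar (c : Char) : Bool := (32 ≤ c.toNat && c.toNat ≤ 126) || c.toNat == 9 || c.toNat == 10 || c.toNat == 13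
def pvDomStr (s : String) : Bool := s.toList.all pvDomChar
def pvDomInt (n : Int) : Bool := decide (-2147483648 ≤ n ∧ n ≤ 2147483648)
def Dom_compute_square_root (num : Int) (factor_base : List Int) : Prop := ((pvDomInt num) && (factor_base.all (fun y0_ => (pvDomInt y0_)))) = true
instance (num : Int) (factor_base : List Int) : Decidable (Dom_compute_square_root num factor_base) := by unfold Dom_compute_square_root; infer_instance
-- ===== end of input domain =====

-- B strips, per base element, the largest power (p²)^(2^k) still dividing num (found by
-- repeated squaring) instead of A's one-p²-at-a-time removal (objective: alternative).

-- ===== PORT A =====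
-- A's `while num % factor == 0` loop; the fuel num.natAbs + 1 strictly exceeds the
-- number of iterations on every input admitted by Pre_, so the port is exact there.
def csrLoopA (p : Int) : Nat → Int → Int → Int × Int
  | 0, num, sq => (num, sq)
  | fuel+1, num, sq =>
    if PySem.Int.mod num (p * p) = 0 then
      csrLoopA p fuel (PySem.Int.floordiv num (p * p)) (sq * p)
    else (num, sq)

def compute_square_root (num : Int) (factor_base : List Int) : Int :=
  (factor_base.foldl (fun st p => csrLoopA p (st.1.natAbs + 1) st.1 st.2) (num, 1)).2

-- ===== PORT B =====
-- B's inner `while num % (step*step) == 0` repeated-squaring loop; fuel num.natAbs + 1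
-- strictly exceeds the number of promotions (step squares each round) inside Pre_.
def csrDbl (num : Int) : Nat → Int → Int → Int × Int
  | 0, step, root => (step, root)
  | fuel+1, step, root =>
    if PySem.Int.mod num (step * step) = 0 then
      csrDbl num fuel (step * step) step
    else (step, root)

-- B's outer `while num % q == 0` loop; each pass divides num by at least q, so fuel
-- num.natAbs + 1 strictly exceeds its iterations inside Pre_.
def csrLoopB (p : Int) : Nat → Int → Int → Int × Int
  | 0, num, sq => (num, sq)
  | fuel+1, num, sq =>
    if PySem.Int.mod num (p * p) = 0 then
      let sr := csrDbl num (num.natAbs + 1) (p * p) p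
      csrLoopB p fuel (PySem.Int.floordiv num sr.1) (sq * sr.2)
    else (num, sq)

def compute_square_root_alt (num : Int) (factor_base : List Int) : Int :=
  (factor_base.foldl (fun st p => csrLoopB p (st.1.natAbs + 1) st.1 st.2) (num, 1)).2

-- ===== PRECONDITION & SPEC =====
-- Pre_ excludes exactly the inputs on which A does not return: p = 0 in the base raises
-- ZeroDivisionError, and num = 0 (with a nonempty base) or |p| = 1 makes A loop forever.
def Pre_compute_square_root (num : Int) (factor_base : List Int) : Prop :=
  (num ≠ 0 ∨ factor_base = []) ∧ ∀ p ∈ factor_base, 2 ≤ p.natAbs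

instance (num : Int) (factor_base : List Int) : Decidable (Pre_compute_square_root num factor_base) := by
  unfold Pre_compute_square_root; infer_instance

def pvWitness_compute_square_root : Int × List Int := (3600, [2, 3, 5])

def Spec_compute_square_root (num : Int) (factor_base : List Int) (out : Int) : Prop := out = compute_square_root_alt num factor_base
instance (num : Int) (factor_base : List Int) (out : Int) : Decidable (Spec_compute_square_root num factor_base out) := by unfold Spec_compute_square_root; infer_instance

-- ===== CLAIM (what is proved, stated in full; the proofs are below) =====
def Claim_equal_compute_square_root : Prop := ∀ (num : Int) (factor_base : List Int), Dom_compute_square_root num factor_base → Pre_compute_square_root num factor_base → Spec_compute_square_root num factor_base (compute_square_root num factor_base)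

-- ===== LEMMAS AND PROOFS =====

-- exact-division bookkeeping
theorem fdiv_exact (a b : Int) (h : b ∣ a) : PySem.Int.floordiv a b * b = a := by
  have hm := PySem.Int.floordiv_mul_add_mod a b
  rw [(PySem.Int.mod_eq_zero_iff_dvd a b).mpr h] at hm
  omega

theorem natAbs_fdiv_lt (a b : Int) (h : b ∣ a) (ha : a ≠ 0) (hb : 2 ≤ b.natAbs) :
    (PySem.Int.floordiv a b).natAbs < a.natAbs := by
  have he := fdiv_exact a b h
  have h1 : (PySem.Int.floordiv a b).natAbs * b.natAbs = a.natAbs := by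
    rw [← Int.natAbs_mul, he]
  have h2 : PySem.Int.floordiv a b ≠ 0 := by
    intro h0; rw [h0, zero_mul] at he; exact ha he.symm
  have h3 : (PySem.Int.floordiv a b).natAbs ≠ 0 := Int.natAbs_ne_zero.mpr h2
  have h5 : (PySem.Int.floordiv a b).natAbs * 2 ≤ (PySem.Int.floordiv a b).natAbs * b.natAbs :=
    Nat.mul_le_mul_left _ hb
  omega

theorem fdiv_mul_self (k b : Int) (hb : b ≠ 0) : PySem.Int.floordiv (k * b) b = k := by
  have h := fdiv_exact (k * b) b ⟨k, mul_comm k b⟩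
  exact mul_right_cancel₀ hb h

-- abstract multiplicity of d in n (0 when the guards fail), used only by the proofs
def multW (d : Int) (n : Int) : Nat :=
  if h : n ≠ 0 ∧ 2 ≤ d.natAbs ∧ PySem.Int.mod n d = 0 then
    multW d (PySem.Int.floordiv n d) + 1
  else 0
  termination_by n.natAbs
  decreasing_by
    exact natAbs_fdiv_lt n d ((PySem.Int.mod_eq_zero_iff_dvd n d).mp h.2.2) h.1 h.2.1

theorem multW_succ (d n : Int) (hn : n ≠ 0) (hd2 : 2 ≤ d.natAbs) (hd : d ∣ n) :
    multW d n = multW d (PySem.Int.floordiv n d) + 1 := by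
  rw [multW]
  simp [hn, hd2, (PySem.Int.mod_eq_zero_iff_dvd n d).mpr hd]

theorem multW_zero (d n : Int) (hnd : ¬ d ∣ n) : multW d n = 0 := by
  rw [multW]
  simp [PySem.Int.mod_eq_zero_iff_dvd, hnd]

theorem multW_pow_dvd (d n : Int) : d ^ multW d n ∣ n := by
  rw [multW]
  split
  · rename_i h
    obtain ⟨hn, hd2, hm⟩ := h
    have hd := (PySem.Int.mod_eq_zero_iff_dvd n d).mp hm
    have he := fdiv_exact n d hd
    have ih := multW_pow_dvd d (PySem.Int.floordiv n d)
    have hmul : d ^ multW d (PySem.Int.floordiv n d) * d ∣ PySem.Int.floordiv n d * d :=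
      mul_dvd_mul ih dvd_rfl
    rw [he] at hmul
    rw [pow_succ]
    exact hmul
  · simp
  termination_by n.natAbs
  decreasing_by
    exact natAbs_fdiv_lt n d ((PySem.Int.mod_eq_zero_iff_dvd n d).mp hm) hn hd2

-- dividing out an exact power d^t removes exactly t from the multiplicity
theorem multW_sub (d : Int) (hd2 : 2 ≤ d.natAbs) (hdne : d ≠ 0) :
    ∀ (t : Nat) (n : Int), n ≠ 0 → d ^ t ∣ n →
      multW d n = multW d (PySem.Int.floordiv n (d ^ t)) + t := by
  intro t
  induction t with
  | zero =>
    intro n hn _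
    simp
  | succ t ih =>
    intro n hn hdvd
    obtain ⟨m, hm⟩ := hdvd
    have hdn : d ∣ n := dvd_trans (dvd_pow_self d (Nat.succ_ne_zero t)) ⟨m, hm⟩
    have hrepr : n = (m * d ^ t) * d := by rw [hm]; ring
    have hq : PySem.Int.floordiv n d = m * d ^ t := by
      rw [hrepr, fdiv_mul_self _ _ hdne]
    have hqne : m * d ^ t ≠ 0 := by
      intro h0
      apply hn
      rw [hrepr, h0, zero_mul]
    have hfull : PySem.Int.floordiv n (d ^ (t + 1)) = m := by
      rw [show n = m * d ^ (t + 1) by rw [hm]; ring, fdiv_mul_self _ _ (pow_ne_zero _ hdne)]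
    have hqt : PySem.Int.floordiv (m * d ^ t) (d ^ t) = m :=
      fdiv_mul_self m _ (pow_ne_zero _ hdne)
    rw [multW_succ d n hn hd2 hdn, hq, ih (m * d ^ t) hqne ⟨m, mul_comm m _⟩, hqt, hfull]
    omega

-- composing exact floor divisions: n / d^t / d^e = n / d^(e+t)
theorem fdiv_fdiv (d : Int) (hdne : d ≠ 0) (t e : Nat) (n : Int) (ht : d ^ t ∣ n)
    (he : d ^ e ∣ PySem.Int.floordiv n (d ^ t)) :
    PySem.Int.floordiv (PySem.Int.floordiv n (d ^ t)) (d ^ e) =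
      PySem.Int.floordiv n (d ^ (e + t)) := by
  set n' := PySem.Int.floordiv n (d ^ t) with hn'
  have h1 : n' * d ^ t = n := fdiv_exact n (d ^ t) ht
  obtain ⟨m, hm⟩ := he
  have h2 : PySem.Int.floordiv n' (d ^ e) = m := by
    rw [hm, mul_comm, fdiv_mul_self _ _ (pow_ne_zero _ hdne)]
  have h3 : PySem.Int.floordiv n (d ^ (e + t)) = m := by
    have hrepr : n = m * d ^ (e + t) := by
      rw [← h1, hm]; ring
    rw [hrepr, fdiv_mul_self _ _ (pow_ne_zero _ hdne)]
  rw [h2, h3]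

-- A's loop removes (p*p)^e one factor at a time, e = multiplicity of p*p in n
theorem csrLoopA_eq (p : Int) (hp : 2 ≤ p.natAbs) :
    ∀ fuel n sq, n ≠ 0 → n.natAbs < fuel →
      csrLoopA p fuel n sq =
        (PySem.Int.floordiv n ((p * p) ^ multW (p * p) n), sq * p ^ multW (p * p) n) := by
  have hpn : p ≠ 0 := by rintro rfl; simp at hp
  have hq2 : 2 ≤ (p * p).natAbs := by rw [Int.natAbs_mul]; nlinarith
  have hqn : p * p ≠ 0 := mul_ne_zero hpn hpn
  intro fuel
  induction fuel with
  | zero => intro n sq hn hf; exact absurd hf (Nat.not_lt_zero _)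
  | succ f ih =>
    intro n sq hn hf
    rw [csrLoopA]
    by_cases hm : PySem.Int.mod n (p * p) = 0
    · rw [if_pos hm]
      have hd : p * p ∣ n := (PySem.Int.mod_eq_zero_iff_dvd n (p * p)).mp hm
      set n' := PySem.Int.floordiv n (p * p) with hn'def
      have he : n' * (p * p) = n := fdiv_exact n (p * p) hd
      have hn' : n' ≠ 0 := by
        intro h0; rw [h0, zero_mul] at he; exact hn he.symm
      have hlt : n'.natAbs < n.natAbs := natAbs_fdiv_lt n (p * p) hd hn hq2
      rw [ih n' (sq * p) hn' (by omega)]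
      have hmw : multW (p * p) n = multW (p * p) n' + 1 := multW_succ _ n hn hq2 hd
      have hd1 : (p * p) ^ 1 ∣ n := by rwa [pow_one]
      have hdiv : PySem.Int.floordiv n' ((p * p) ^ multW (p * p) n') =
          PySem.Int.floordiv n ((p * p) ^ (multW (p * p) n' + 1)) := by
        have := fdiv_fdiv (p * p) hqn 1 (multW (p * p) n') n hd1
          (by rw [← pow_one (p * p)] at hn'def; rw [hn'def] at *; exact multW_pow_dvd _ _)
        rw [← this]
        congr 1
        rw [pow_one]
      rw [hmw, hdiv]
      have hpow : sq * p * p ^ multW (p * p) n' = sq * p ^ (multW (p * p) n' + 1) := by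
        rw [pow_succ]; ring
      rw [hpow]
    · rw [if_neg hm]
      have h0 : multW (p * p) n = 0 :=
        multW_zero _ _ (fun hd => hm ((PySem.Int.mod_eq_zero_iff_dvd n (p * p)).mpr hd))
      rw [h0]
      simp

-- the repeated-squaring search returns some exact power (p*p)^t, p^t with t ≥ s
theorem csrDbl_ex (p n : Int) :
    ∀ (fuel s : Nat), 1 ≤ s → (p * p) ^ s ∣ n →
      ∃ t, s ≤ t ∧ (p * p) ^ t ∣ n ∧
        csrDbl n fuel ((p * p) ^ s) (p ^ s) = ((p * p) ^ t, p ^ t) := by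
  intro fuel
  induction fuel with
  | zero => intro s hs hd; exact ⟨s, le_refl s, hd, rfl⟩
  | succ f ih =>
    intro s hs hd
    rw [csrDbl]
    by_cases hm : PySem.Int.mod n ((p * p) ^ s * (p * p) ^ s) = 0
    · rw [if_pos hm]
      have hd2 : (p * p) ^ (s + s) ∣ n := by
        rw [pow_add]
        exact (PySem.Int.mod_eq_zero_iff_dvd _ _).mp hm
      obtain ⟨t, ht1, ht2, ht3⟩ := ih (s + s) (by omega) hd2
      refine ⟨t, by omega, ht2, ?_⟩
      rw [← ht3]
      congr 1
      · rw [pow_add]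
      · rw [pow_add, mul_pow]
    · rw [if_neg hm]
      exact ⟨s, le_refl s, hd, rfl⟩

-- B's loop also removes (p*p)^e in total, in greedy binary chunks
theorem csrLoopB_eq (p : Int) (hp : 2 ≤ p.natAbs) :
    ∀ fuel n sq, n ≠ 0 → n.natAbs < fuel →
      csrLoopB p fuel n sq =
        (PySem.Int.floordiv n ((p * p) ^ multW (p * p) n), sq * p ^ multW (p * p) n) := by
  have hpn : p ≠ 0 := by rintro rfl; simp at hp
  have hq2 : 2 ≤ (p * p).natAbs := by rw [Int.natAbs_mul]; nlinarith
  have hqn : p * p ≠ 0 := mul_ne_zero hpn hpn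
  intro fuel
  induction fuel with
  | zero => intro n sq hn hf; exact absurd hf (Nat.not_lt_zero _)
  | succ f ih =>
    intro n sq hn hf
    rw [csrLoopB]
    by_cases hm : PySem.Int.mod n (p * p) = 0
    · rw [if_pos hm]
      have hd : (p * p) ^ 1 ∣ n := by
        rw [pow_one]; exact (PySem.Int.mod_eq_zero_iff_dvd n (p * p)).mp hm
      obtain ⟨t, ht1, htd, hteq⟩ := csrDbl_ex p n (n.natAbs + 1) 1 (le_refl 1) hd
      rw [pow_one, pow_one] at hteq
      rw [hteq]
      simp only
      set n' := PySem.Int.floordiv n ((p * p) ^ t) with hn'def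
      have he : n' * (p * p) ^ t = n := fdiv_exact n ((p * p) ^ t) htd
      have hn' : n' ≠ 0 := by
        intro h0; rw [h0, zero_mul] at he; exact hn he.symm
      have hqt2 : 2 ≤ ((p * p) ^ t).natAbs := by
        rw [Int.natAbs_pow]
        calc 2 = 2 ^ 1 := rfl
          _ ≤ 2 ^ t := Nat.pow_le_pow_right (by omega) ht1
          _ ≤ (p * p).natAbs ^ t := Nat.pow_le_pow_left hq2 t
      have hlt : n'.natAbs < n.natAbs := natAbs_fdiv_lt n ((p * p) ^ t) htd hn hqt2
      rw [ih n' (sq * p ^ t) hn' (by omega)]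
      have hmw : multW (p * p) n = multW (p * p) n' + t := multW_sub (p * p) hq2 hqn t n hn htd
      have hdiv : PySem.Int.floordiv n' ((p * p) ^ multW (p * p) n') =
          PySem.Int.floordiv n ((p * p) ^ (multW (p * p) n' + t)) :=
        fdiv_fdiv (p * p) hqn t (multW (p * p) n') n htd (multW_pow_dvd _ _)
      rw [hmw, hdiv]
      have hpow : sq * p ^ t * p ^ multW (p * p) n' = sq * p ^ (multW (p * p) n' + t) := by
        rw [pow_add]; ring
      rw [hpow]
    · rw [if_neg hm]
      have h0 : multW (p * p) n = 0 :=
        multW_zero _ _ (fun hd => hm ((PySem.Int.mod_eq_zero_iff_dvd n (p * p)).mpr hd))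
      rw [h0]
      simp

def stepA (st : Int × Int) (p : Int) : Int × Int := csrLoopA p (st.1.natAbs + 1) st.1 st.2

def stepB (st : Int × Int) (p : Int) : Int × Int := csrLoopB p (st.1.natAbs + 1) st.1 st.2

theorem fold_eq :
    ∀ (fb : List Int) (n s : Int), n ≠ 0 → (∀ p ∈ fb, 2 ≤ p.natAbs) →
      List.foldl stepA (n, s) fb = List.foldl stepB (n, s) fb := by
  intro fb
  induction fb with
  | nil => intro n s _ _; rfl
  | cons p fb ih =>
    intro n s hn hall
    have hp := hall p (List.mem_cons_self ..)
    have hpn : p ≠ 0 := by rintro rfl; simp at hp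
    have hq2 : 2 ≤ (p * p).natAbs := by rw [Int.natAbs_mul]; nlinarith
    simp only [List.foldl_cons, stepA, stepB]
    rw [csrLoopA_eq p hp (n.natAbs + 1) n s hn (Nat.lt_succ_self _),
        csrLoopB_eq p hp (n.natAbs + 1) n s hn (Nat.lt_succ_self _)]
    have hdvd : (p * p) ^ multW (p * p) n ∣ n := multW_pow_dvd _ _
    have hq := fdiv_exact n ((p * p) ^ multW (p * p) n) hdvd
    have hn' : PySem.Int.floordiv n ((p * p) ^ multW (p * p) n) ≠ 0 := by
      intro h0; rw [h0, zero_mul] at hq; exact hn hq.symm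
    exact ih _ _ hn' (fun q hqm => hall q (List.mem_cons_of_mem _ hqm))

-- ===== VERDICT (by name: the statement is the Claim_ definition above) =====
theorem compute_square_root_spec : Claim_equal_compute_square_root := by
  intro num fb _ hpre
  unfold Spec_compute_square_root compute_square_root compute_square_root_alt
  rcases hpre with ⟨h0, hall⟩
  rcases h0 with h0 | h0
  · show (List.foldl stepA (num, 1) fb).2 = (List.foldl stepB (num, 1) fb).2
    rw [fold_eq fb num 1 h0 hall]
  · subst h0; rfl
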